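-- pv_equiv track=rewrite | github.com/AngelitoRGB/Sopa_de_letras | sopav6.py | rotarSopa3
-- ===== SOURCE A (Python) =====
-- def rotarSopa3(sopa):
--     dimension = len(sopa[0])
--     nuevaSopa = []
--     count = 0
--     while count < dimension:
--         linea = ""
--         for i in range(0,dimension):
--             columna = sopa[i]
--             linea += columna[count]
--         linea = linea[::-1]
--         nuevaSopa.append(linea)
--         count += 1
--     return nuevaSopa
-- ===== SOURCE B (Python) =====
-- def rotarSopa3(sopa):
--     dimension = len(sopa[0])
--     acc = [""] * dimension
--     for i in range(dimension):
--         row = sopa[i]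
--         acc = [row[c] + acc[c] for c in range(dimension)]
--     return acc
-- ===== Notes on version B (the rewrite author's own statement) =====
-- stated objective: alternative
-- what changed: B makes a single top-to-bottom pass over the rows, maintaining an accumulator of partial output strings and PREPENDING each row's characters, so no reversal step exists anywhere; A assembles each column left-to-right per output row and then reverses each assembled string.
import Mathlib
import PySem

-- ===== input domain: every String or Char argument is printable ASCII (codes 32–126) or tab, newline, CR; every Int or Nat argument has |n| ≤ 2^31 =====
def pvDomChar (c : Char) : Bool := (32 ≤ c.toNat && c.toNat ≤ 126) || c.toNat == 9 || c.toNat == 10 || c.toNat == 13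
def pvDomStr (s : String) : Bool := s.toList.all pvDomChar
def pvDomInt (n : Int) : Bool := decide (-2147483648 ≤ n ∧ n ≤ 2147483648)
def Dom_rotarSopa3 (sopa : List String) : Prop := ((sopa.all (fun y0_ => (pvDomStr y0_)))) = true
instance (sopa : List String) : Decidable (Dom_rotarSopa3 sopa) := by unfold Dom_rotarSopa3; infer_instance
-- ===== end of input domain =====

-- B makes one top-to-bottom pass over the rows, prepending each row's characters to an
-- accumulator of partial output strings (no reversal step anywhere); A assembles each
-- output row column-wise and reverses each assembled string (objective: alternative).

-- ===== PORT A =====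
-- literal port of A: while-loop over column index `count`; the inner for-loop appends
-- sopa[i][count] to a growing string; the string is reversed and appended to the result.
def rotarSopa3 (sopa : List String) : List String :=
  let dimension : Int := ((PySem.List.pyGet? sopa 0).getD "").toList.length
  (PySem.List.pyRange 0 dimension 1).foldl (fun nuevaSopa count =>
    let linea : List Char := (PySem.List.pyRange 0 dimension 1).foldl (fun linea i =>
      let columna := PySem.List.pyGetD sopa i ""
      linea ++ [(PySem.Str.pyGet? columna count).getD ' ']) []
    nuevaSopa ++ [String.ofList linea.reverse]) []

-- ===== PORT B =====
-- literal port of B: acc = [""]*d; for each row i, acc = [row[c] + acc[c] for c in range(d)].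
def rotarSopa3_alt (sopa : List String) : List String :=
  let dimension : Nat := ((PySem.List.pyGet? sopa 0).getD "").toList.length
  let acc0 : List (List Char) := List.replicate dimension []
  ((List.range dimension).foldl (fun acc (i : Nat) =>
    let row := PySem.List.pyGetD sopa (i : Int) ""
    (List.range dimension).map (fun (c : Nat) =>
      ((PySem.Str.pyGet? row (c : Int)).getD ' ') :: acc.getD c [])) acc0).map String.ofList

-- ===== PRECONDITION & SPEC =====
-- Pre_ excludes exactly the inputs where A raises IndexError: the empty list (sopa[0]),
-- and grids whose first len(sopa[0]) rows are missing or shorter than len(sopa[0]).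
def Pre_rotarSopa3 (sopa : List String) : Prop :=
  sopa ≠ [] ∧ (sopa.headD "").toList.length ≤ sopa.length ∧
    ∀ s ∈ sopa.take (sopa.headD "").toList.length,
      (sopa.headD "").toList.length ≤ s.toList.length
instance (sopa : List String) : Decidable (Pre_rotarSopa3 sopa) := by
  unfold Pre_rotarSopa3; infer_instance
def pvWitness_rotarSopa3 : List String := ["ab", "cd"]
def Spec_rotarSopa3 (sopa : List String) (out : List String) : Prop := out = rotarSopa3_alt sopa
instance (sopa : List String) (out : List String) : Decidable (Spec_rotarSopa3 sopa out) := by unfold Spec_rotarSopa3; infer_instance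

-- ===== CLAIM (what is proved, stated in full; the proofs are below) =====
def Claim_equal_rotarSopa3 : Prop := ∀ (sopa : List String), Dom_rotarSopa3 sopa → Pre_rotarSopa3 sopa → Spec_rotarSopa3 sopa (rotarSopa3 sopa)

-- ===== LEMMAS AND PROOFS =====

lemma flatten_map_singleton {α β : Type} (g : α → β) (r : List α) :
    (List.map (fun x => [g x]) r).flatten = List.map g r := by
  induction r with
  | nil => rfl
  | cons a t ih => simp [ih]

lemma foldl_app_singleton {α β : Type} (F : α → β) (r : List α) :
    r.foldl (fun acc c => acc ++ [F c]) [] = r.map F := by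
  simpa using (flatten_map_singleton F r)

lemma getD_map_range {β : Type} (f : ℕ → β) (d c : ℕ) (dflt : β) (hc : c < d) :
    ((List.range d).map f).getD c dflt = f c := by
  rw [List.getD_eq_getElem _ _ (by simpa using hc)]
  simp

-- invariant of B's row pass: after k rows, slot c holds column c of the first k rows, reversed
lemma alt_fold_inv (ch : ℕ → ℕ → Char) (d : ℕ) (k : ℕ) :
    (List.range k).foldl (fun acc i =>
        (List.range d).map (fun c => ch i c :: acc.getD c [])) (List.replicate d []) =
      (List.range d).map (fun c => ((List.range k).map (fun i => ch i c)).reverse) := by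
  induction k with
  | zero => simp
  | succ k ih =>
    rw [List.range_succ, List.foldl_append, ih]
    simp only [List.foldl_cons, List.foldl_nil]
    apply List.map_congr_left
    intro c hc
    rw [List.mem_range] at hc
    rw [getD_map_range _ _ _ _ hc]
    simp

lemma rotarSopa3_eq_alt (sopa : List String) :
    rotarSopa3 sopa = rotarSopa3_alt sopa := by
  simp only [rotarSopa3, rotarSopa3_alt]
  generalize hdd : ((PySem.List.pyGet? sopa 0).getD "").toList.length = d
  simp only [foldl_app_singleton]
  rw [alt_fold_inv (fun i c => (PySem.Str.pyGet? (PySem.List.pyGetD sopa (i : Int) "") (c : Int)).getD ' ') d d]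
  simp only [PySem.List.pyRange_zero_nat, List.map_map]
  apply List.map_congr_left
  intro c _
  simp only [Function.comp_def]

-- ===== VERDICT (by name: the statement is the Claim_ definition above) =====
theorem rotarSopa3_spec : Claim_equal_rotarSopa3 := by
  intro sopa _ _
  unfold Spec_rotarSopa3
  exact rotarSopa3_eq_alt sopa
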